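-- pv_equiv track=rewrite | github.com/wumusill/Programmers | Lv2/repeat_binary_transformation.py | solution
-- ===== SOURCE A (Python) =====
-- def solution(s):
--     l = list(s)
--     answer = [0, 0]
--     while True:
--         if len(l) == 1:
--             break
--
--         answer[1] += l.count('0')
--         l = bin(l.count('1'))[2:]
--         answer[0] += 1
--
--     return answer
-- ===== SOURCE B (Python) =====
-- def solution(s):
--     if len(s) == 1:
--         return [0, 0]
--     zeros = s.count('0')
--     sub = solution(bin(s.count('1'))[2:])
--     return [sub[0] + 1, sub[1] + zeros]
-- ===== Notes on version B (the rewrite author's own statement) =====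
-- stated objective: alternative
-- what changed: Replaces the while loop that mutates a two-cell accumulator list with a direct recursion over the reduction that combines the sub-result on the way back up, counting zeros with str.count instead of converting to a list first.
import Mathlib
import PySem

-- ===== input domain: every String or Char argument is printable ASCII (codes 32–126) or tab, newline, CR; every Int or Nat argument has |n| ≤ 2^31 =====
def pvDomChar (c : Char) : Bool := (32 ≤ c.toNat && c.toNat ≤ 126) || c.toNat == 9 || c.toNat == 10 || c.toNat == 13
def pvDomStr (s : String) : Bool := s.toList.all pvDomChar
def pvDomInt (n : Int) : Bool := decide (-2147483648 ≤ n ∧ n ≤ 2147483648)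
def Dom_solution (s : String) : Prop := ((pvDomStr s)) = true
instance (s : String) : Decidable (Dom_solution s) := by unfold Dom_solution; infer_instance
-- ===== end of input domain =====

-- B replaces A's accumulator-mutating while loop with a direct recursion that combines sub-results; same cost (objective: alternative).
-- Both ports guard the loop/recursion with fuel 2*len+2, which the measure (length + number of '1's) shows is never exhausted.


-- shared helper: Python's bin(n)[2:] for n ≥ 0 is exactly Nat.toDigits 2 n (most-significant first, ['0'] for 0)
def binNat (n : Nat) : List Char := Nat.toDigits 2 n

-- ===== PORT A =====
-- the while loop, transliterated as fuel-guarded structural recursion; answer = [a0, a1] carried as two accumulators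
def solutionGo : Nat → List Char → Int → Int → List Int
  | 0, _, a0, a1 => [a0, a1]
  | fuel + 1, l, a0, a1 =>
    if l.length = 1 then [a0, a1]
    else solutionGo fuel (binNat (l.count '1')) (a0 + 1) (a1 + (l.count '0' : Int))

def solution (s : String) : List Int := solutionGo (2 * s.toList.length + 2) s.toList 0 0

-- ===== PORT B =====
-- direct recursion (fuel-guarded): returns the (iterations, zeros) pair for the whole reduction
def solutionAltGo : Nat → List Char → Int × Int
  | 0, _ => (0, 0)
  | fuel + 1, l =>
    if l.length = 1 then (0, 0)
    else
      let zeros : Int := l.count '0'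
      let sub := solutionAltGo fuel (binNat (l.count '1'))
      (sub.1 + 1, sub.2 + zeros)

def solution_alt (s : String) : List Int :=
  [(solutionAltGo (2 * s.toList.length + 2) s.toList).1,
   (solutionAltGo (2 * s.toList.length + 2) s.toList).2]

-- ===== PRECONDITION & SPEC =====
def Spec_solution (s : String) (out : List Int) : Prop := out = solution_alt s
instance (s : String) (out : List Int) : Decidable (Spec_solution s out) := by unfold Spec_solution; infer_instance

-- ===== CLAIM (what is proved, stated in full; the proofs are below) =====
def Claim_equal_solution : Prop := ∀ (s : String), Dom_solution s → Spec_solution s (solution s)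

-- ===== LEMMAS AND PROOFS =====
theorem go_eq (n : Nat) : ∀ (l : List Char) (a0 a1 : Int),
    solutionGo n l a0 a1 = [a0 + (solutionAltGo n l).1, a1 + (solutionAltGo n l).2] := by
  induction n with
  | zero => intro l a0 a1; simp [solutionGo, solutionAltGo]
  | succ m ih =>
    intro l a0 a1
    by_cases h : l.length = 1
    · simp [solutionGo, solutionAltGo, h]
    · rw [show solutionGo (m + 1) l a0 a1 =
            solutionGo m (binNat (l.count '1')) (a0 + 1) (a1 + (l.count '0' : Int)) from by
          rw [solutionGo]; exact if_neg h]
      rw [show solutionAltGo (m + 1) l =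
            ((solutionAltGo m (binNat (l.count '1'))).1 + 1,
             (solutionAltGo m (binNat (l.count '1'))).2 + (l.count '0' : Int)) from by
          rw [solutionAltGo]; exact if_neg h]
      rw [ih]
      simp only [List.cons.injEq, and_true]
      constructor <;> ring

-- ===== VERDICT (by name: the statement is the Claim_ definition above) =====
theorem solution_spec : Claim_equal_solution := by
  intro s _
  unfold Spec_solution solution solution_alt
  rw [go_eq]
  simp
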